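-- pv_equiv track=rewrite | github.com/miiiingyuuu/Algorithm | 백준/Gold/17140. 이차원 배열과 연산/이차원 배열과 연산.py | calculate
-- ===== SOURCE A (Python) =====
-- from collections import Counter
--
-- def calculate(current_a):
--     new_a = []
--     max_len = 0
--
--     for row in current_a:
--         counter = Counter(num for num in row if num != 0)
--
--         # 해당 숫자들의 양이 작은 숫자들 부터 오름차순 정렬
--         sorted_nums = sorted(counter.items(), key=lambda x: (x[1], x[0]))
--
--         new_row = []
--         for num, freq in sorted_nums:
--             new_row.extend([num, freq])
--
--         # 행 또는 열의 크기가 100을 넘어가면 처음의 100개만 사용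
--         if len(new_row) > 100:
--             new_row = new_row[:100]
--
--         new_a.append(new_row)
--         # 연산 후 가장 긴 행의 길이를 통해 빈 자리는 0으로 채우기
--         if len(new_row) > max_len:
--             max_len = len(new_row)
--
--     for row in new_a:
--         row.extend([0] * (max_len - len(row)))
--
--     return new_a
-- ===== SOURCE B (Python) =====
-- def _row(row):
--     # selection by repeated minimum: no tally table and no sort; pick the
--     # (count, value)-smallest remaining value, emit it, remove its occurrences,
--     # stop once 100 cells are produced
--     pool = [x for x in row if x != 0]
--     out = []
--     while pool and len(out) < 100:
--         v = min(pool, key=lambda x: (pool.count(x), x))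
--         out += [v, pool.count(v)]
--         pool = [x for x in pool if x != v]
--     return out
--
-- def calculate(current_a):
--     rows = [_row(row) for row in current_a]
--     max_len = max([0] + [len(r) for r in rows])
--     return [r + [0] * (max_len - len(r)) for r in rows]
-- ===== Notes on version B (the rewrite author's own statement) =====
-- stated objective: alternative
-- what changed: Per row, A's Counter tally followed by a sort of (value,count) pairs is replaced by selection without any tally or sort: repeatedly take the (count,value)-minimal remaining value from the multiset, emit [value,count], delete its occurrences, and stop once 100 cells are emitted; max_len is computed over the finished rows instead of tracked inline.
import Mathlib
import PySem

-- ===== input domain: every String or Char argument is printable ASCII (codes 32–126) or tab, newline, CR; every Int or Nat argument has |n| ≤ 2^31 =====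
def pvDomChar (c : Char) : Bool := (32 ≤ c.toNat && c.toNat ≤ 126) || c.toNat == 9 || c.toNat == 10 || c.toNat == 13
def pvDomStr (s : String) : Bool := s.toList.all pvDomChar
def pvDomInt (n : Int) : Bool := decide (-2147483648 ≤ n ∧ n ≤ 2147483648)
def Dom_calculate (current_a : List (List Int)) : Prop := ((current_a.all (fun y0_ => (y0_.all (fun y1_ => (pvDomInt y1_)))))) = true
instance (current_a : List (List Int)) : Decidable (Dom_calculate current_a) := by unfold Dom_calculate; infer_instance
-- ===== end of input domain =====

-- B replaces A's per-row Counter tally + sort of (value,count) pairs by selection with no tally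
-- and no sort: repeatedly pick the (count,value)-minimal remaining value and delete it
-- (alternative decomposition); A's final in-place row.extend padding is ported as the
-- value-equal padding map (return value only; neither side mutates the input list).

-- ===== PORT A =====
def calculate (current_a : List (List Int)) : List (List Int) :=
  -- the for-loop carrying (new_a, max_len); loop body transcribed inline
  let st := current_a.foldl (fun (st : List (List Int) × Int) row =>
    let counter := PySem.Dict.counter (row.filter (fun num => num != 0))
    let sorted_nums := PySem.List.sorted2 counter.items (fun x => x.2) (fun x => x.1)
    let new_row := sorted_nums.foldl (fun r p => r ++ [p.1, p.2]) []
    let new_row := if 100 < new_row.length then PySem.List.slice new_row none (some 100) else new_row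
    (st.1 ++ [new_row], if st.2 < (new_row.length : Int) then (new_row.length : Int) else st.2))
    ([], 0)
  -- 'for row in new_a: row.extend([0] * (max_len - len(row)))'
  st.1.map (fun row => row ++ PySem.List.pyRepeat [0] (st.2 - (row.length : Int)))

-- ===== PORT B =====
-- the accumulator step of Python's min(pool, key=lambda x: (count(x), x)) (first minimum wins)
def pvMinStep (k1 : Int → Int) (acc : Option Int) (x : Int) : Option Int :=
  match acc with
  | none => some x
  | some m => if (decide (k1 x < k1 m) || (!decide (k1 m < k1 x) && decide (x < m))) = true
              then some x else some m

lemma pvMin2_eq (xs : List Int) (k1 : Int → Int) :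
    PySem.List.min2? xs k1 (fun x => x) = xs.foldl (pvMinStep k1) none := by
  unfold PySem.List.min2?
  congr 1
  funext acc x
  cases acc <;> rfl

-- termination fact for the while loop: the selected value is in the pool
lemma pvMin2_go_mem (k1 : Int → Int) : ∀ (l : List Int) (m0 : Int),
    ∃ m, l.foldl (pvMinStep k1) (some m0) = some m ∧ (m = m0 ∨ m ∈ l) := by
  intro l
  induction l with
  | nil => intro m0; exact ⟨m0, rfl, Or.inl rfl⟩
  | cons x xs ih =>
    intro m0
    simp only [List.foldl_cons]
    by_cases h : (decide (k1 x < k1 m0) || (!decide (k1 m0 < k1 x) && decide (x < m0))) = true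
    · obtain ⟨m, hm, hmem⟩ := ih x
      exact ⟨m, by simp only [pvMinStep, h, if_true]; exact hm,
        by rcases hmem with h' | h' <;> simp [h']⟩
    · obtain ⟨m, hm, hmem⟩ := ih m0
      exact ⟨m, by simp only [pvMinStep, eq_false h, if_false]; exact hm,
        by rcases hmem with h' | h' <;> simp [h']⟩

lemma pvMin2_getD_mem (p : Int) (ps : List Int) (k1 : Int → Int) :
    ((PySem.List.min2? (p :: ps) k1 (fun x => x)).getD 0) ∈ p :: ps := by
  obtain ⟨m, hm, hmem⟩ := pvMin2_go_mem k1 ps p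
  rw [pvMin2_eq, List.foldl_cons, show pvMinStep k1 none p = some p from rfl, hm]
  rcases hmem with h | h <;> simp [h]

lemma pvSel_dec (p : Int) (ps : List Int) (v : Int)
    (hv : v ∈ p :: ps) : ((p :: ps).filter (fun x => x != v)).length < (p :: ps).length :=
  List.length_filter_lt_length_iff_exists.mpr ⟨v, hv, by simp⟩

-- the 'while pool and len(out) < 100' loop of _row
def pvSelLoop (pool : List Int) (out : List Int) : List Int :=
  match pool with
  | [] => out
  | p :: ps =>
    if 100 ≤ out.length then out
    else
      -- pool is nonempty here, so Python's min returns a value; the .getD 0 default is never used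
      let v := (PySem.List.min2? (p :: ps) (fun x => ((p :: ps).count x : Int)) (fun x => x)).getD 0
      pvSelLoop ((p :: ps).filter (fun x => x != v)) (out ++ [v, ((p :: ps).count v : Int)])
termination_by pool.length
decreasing_by exact pvSel_dec p ps _ (pvMin2_getD_mem p ps _)

-- _row
def pvRowB (row : List Int) : List Int := pvSelLoop (row.filter (fun x => x != 0)) []

def calculate_alt (current_a : List (List Int)) : List (List Int) :=
  let rows := current_a.map pvRowB
  -- max([0] + [len(r) for r in rows]): the list is nonempty, so Python's max returns; .getD 0 is never used
  let maxLen := (PySem.List.max? ((0 : Int) :: rows.map (fun r => (r.length : Int))) (fun x => x)).getD 0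
  rows.map (fun r => r ++ PySem.List.pyRepeat [0] (maxLen - (r.length : Int)))

-- ===== PRECONDITION & SPEC =====
def Spec_calculate (current_a : List (List Int)) (out : List (List Int)) : Prop := out = calculate_alt current_a
instance (current_a : List (List Int)) (out : List (List Int)) : Decidable (Spec_calculate current_a out) := by unfold Spec_calculate; infer_instance

-- ===== CLAIM (what is proved, stated in full; the proofs are below) =====
def Claim_equal_calculate : Prop := ∀ (current_a : List (List Int)), Dom_calculate current_a → Spec_calculate current_a (calculate current_a)

-- ===== LEMMAS AND PROOFS =====

-- A's loop body, as a named function (definitionally the inlined body)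
def pvRowA (row : List Int) : List Int :=
  let counter := PySem.Dict.counter (row.filter (fun num => num != 0))
  let sorted_nums := PySem.List.sorted2 counter.items (fun x => x.2) (fun x => x.1)
  let new_row := sorted_nums.foldl (fun r p => r ++ [p.1, p.2]) []
  if 100 < new_row.length then PySem.List.slice new_row none (some 100) else new_row

-- the lex key A sorts the (value, count) pairs by
def pvKey (q : Int × Int) : Lex (Int × Int) := toLex (q.2, q.1)

-- sorted with tuple key (k1, k2) is sorted with the corresponding lexicographic key
lemma pvSorted2_eq_sorted_lex (xs : List (Int × Int)) :
    PySem.List.sorted2 xs (fun x => x.2) (fun x => x.1) = PySem.List.sorted xs pvKey := by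
  have h : (fun (a b : Int × Int) => decide (a.2 < b.2) || (!decide (b.2 < a.2) && decide (a.1 < b.1)))
      = (fun (a b : Int × Int) => decide (pvKey a < pvKey b)) := by
    funext a b
    by_cases h1 : a.2 < b.2 <;> by_cases h2 : b.2 < a.2 <;> by_cases h3 : a.1 < b.1 <;>
      simp [pvKey, h1, h2, h3, Prod.Lex.lt_iff] <;> omega
  simp only [PySem.List.sorted2, PySem.List.sorted, if_neg (by decide : ¬ (false = true)), h]

lemma pvKeyInj : Function.Injective pvKey := by
  intro a b h
  have := toLex.injective h
  simp only [Prod.mk.injEq] at this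
  exact Prod.ext this.2 this.1

-- full spec of Python's min(pool, key=lambda x: (count(x), x)) on a nonempty pool
lemma pvMin2_go_spec (k1 : Int → Int) : ∀ (l : List Int) (m0 : Int),
    ∃ m, l.foldl (pvMinStep k1) (some m0) = some m ∧ (m = m0 ∨ m ∈ l) ∧
      toLex (k1 m, m) ≤ toLex (k1 m0, m0) ∧ ∀ y ∈ l, toLex (k1 m, m) ≤ toLex (k1 y, y) := by
  have hcond : ∀ (x m : Int), (decide (k1 x < k1 m) || (!decide (k1 m < k1 x) && decide (x < m))) = true
      ↔ toLex (k1 x, x) < toLex (k1 m, m) := by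
    intro x m
    by_cases h1 : k1 x < k1 m <;> by_cases h2 : k1 m < k1 x <;> by_cases h3 : x < m <;>
      simp [h1, h2, h3, Prod.Lex.lt_iff] <;> omega
  intro l
  induction l with
  | nil => intro m0; exact ⟨m0, rfl, Or.inl rfl, le_refl _, by simp⟩
  | cons x xs ih =>
    intro m0
    simp only [List.foldl_cons]
    by_cases h : (decide (k1 x < k1 m0) || (!decide (k1 m0 < k1 x) && decide (x < m0))) = true
    · obtain ⟨m, hm, hmem, hle, hall⟩ := ih x
      have hxm0 : toLex (k1 x, x) < toLex (k1 m0, m0) := (hcond x m0).mp h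
      refine ⟨m, by simp only [pvMinStep, h, if_true]; exact hm,
        by rcases hmem with h' | h' <;> simp [h'],
        le_of_lt (lt_of_le_of_lt hle hxm0), ?_⟩
      intro y hy
      rcases List.mem_cons.mp hy with h' | h'
      · exact h' ▸ hle
      · exact hall y h'
    · obtain ⟨m, hm, hmem, hle, hall⟩ := ih m0
      have hxm0 : ¬ toLex (k1 x, x) < toLex (k1 m0, m0) := fun hc => h ((hcond x m0).mpr hc)
      refine ⟨m, by simp only [pvMinStep, eq_false h, if_false]; exact hm,
        by rcases hmem with h' | h' <;> simp [h'], hle, ?_⟩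
      intro y hy
      rcases List.mem_cons.mp hy with h' | h'
      · exact h' ▸ le_trans hle (le_of_not_gt hxm0)
      · exact hall y h'

lemma pvMin2_spec (p : Int) (ps : List Int) (k1 : Int → Int) :
    let v := (PySem.List.min2? (p :: ps) k1 (fun x => x)).getD 0
    v ∈ p :: ps ∧ ∀ y ∈ p :: ps, toLex (k1 v, v) ≤ toLex (k1 y, y) := by
  obtain ⟨m, hm, hmem, hle, hall⟩ := pvMin2_go_spec k1 ps p
  have hv : PySem.List.min2? (p :: ps) k1 (fun x => x) = some m := by
    rw [pvMin2_eq, List.foldl_cons, show pvMinStep k1 none p = some p from rfl, hm]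
  intro v
  have hveq : v = m := by simp [v, hv]
  subst hveq
  refine ⟨by rcases hmem with h | h <;> simp [h], ?_⟩
  intro y hy
  rcases List.mem_cons.mp hy with h' | h'
  · exact h' ▸ hle
  · exact hall y h'

-- Counter(pool).items membership, via items_counter
lemma pvItems_mem (pool : List Int) (k c : Int) :
    (k, c) ∈ (PySem.Set.ofList pool).map (fun k => (k, (pool.count k : Int)))
      ↔ k ∈ pool ∧ c = (pool.count k : Int) := by
  simp only [List.mem_map, PySem.Set.mem_ofList, Prod.mk.injEq]
  constructor
  · rintro ⟨a, ha, rfl, rfl⟩; exact ⟨ha, rfl⟩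
  · rintro ⟨hk, rfl⟩; exact ⟨k, hk, rfl, rfl⟩

lemma pvItems_nodup (pool : List Int) :
    ((PySem.Set.ofList pool).map (fun k => (k, (pool.count k : Int)))).Nodup :=
  (PySem.Set.nodup_ofList pool).map (fun _ _ h => (Prod.mk.injEq .. ▸ h).1)

-- the per-row key step: the selected minimum heads the sorted pair list of the pool,
-- and the rest is the sorted pair list of the pool with that value removed
lemma pvHead (p : Int) (ps : List Int) (v : Int)
    (hv : v = (PySem.List.min2? (p :: ps) (fun x => (List.count x (p :: ps) : Int)) (fun x => x)).getD 0) :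
    PySem.List.sorted ((PySem.Set.ofList (p :: ps)).map (fun k => (k, (List.count k (p :: ps) : Int)))) pvKey
      = (v, (List.count v (p :: ps) : Int)) ::
        PySem.List.sorted (((PySem.Set.ofList ((p :: ps).filter (fun x => x != v))).map
          (fun k => (k, (List.count k ((p :: ps).filter (fun x => x != v)) : Int))))) pvKey := by
  obtain ⟨hvmem, hvmin⟩ := pvMin2_spec p ps (fun x => (List.count x (p :: ps) : Int))
  rw [← hv] at hvmem hvmin
  set pool := p :: ps with hpool
  set pool' := pool.filter (fun x => x != v) with hpool'
  have hmem' : ∀ k c, (k, c) ∈ (PySem.Set.ofList pool').map (fun k => (k, (List.count k pool' : Int)))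
      ↔ (k ∈ pool ∧ k ≠ v ∧ c = (List.count k pool : Int)) := by
    intro k c
    rw [pvItems_mem]
    constructor
    · rintro ⟨hk, rfl⟩
      have hk' := List.mem_filter.mp hk
      have hkv : k ≠ v := by simpa using hk'.2
      exact ⟨hk'.1, hkv, by rw [List.count_filter (by simpa using hkv)]⟩
    · rintro ⟨hk, hkv, rfl⟩
      have hk' : k ∈ pool' := List.mem_filter.mpr ⟨hk, by simpa using hkv⟩
      refine ⟨hk', ?_⟩
      rw [List.count_filter (by simpa using hkv)]
  have hT := PySem.List.sorted_perm ((PySem.Set.ofList pool').map (fun k => (k, (List.count k pool' : Int)))) pvKey false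
  apply PySem.List.sorted_eq_of_perm_of_pairwise_lt
  · -- permutation with Counter(pool)'s pair list
    refine List.Perm.trans (List.Perm.cons _ hT) ?_
    rw [List.perm_ext_iff_of_nodup ?nd1 (pvItems_nodup pool)]
    case nd1 =>
      refine List.Nodup.cons ?_ (pvItems_nodup pool')
      intro hmem
      exact ((hmem' v _).mp hmem).2.1 rfl
    rintro ⟨k, c⟩
    rw [List.mem_cons, hmem' k c, pvItems_mem, Prod.mk.injEq]
    constructor
    · rintro (⟨rfl, rfl⟩ | ⟨hk, _, rfl⟩)
      · exact ⟨hvmem, rfl⟩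
      · exact ⟨hk, rfl⟩
    · rintro ⟨hk, rfl⟩
      by_cases hkv : k = v
      · subst hkv; exact Or.inl ⟨rfl, rfl⟩
      · exact Or.inr ⟨hk, hkv, rfl⟩
  · -- strictly increasing in the lex key
    refine List.Pairwise.cons ?_ ?_
    · intro y hy
      obtain ⟨k, c⟩ := y
      obtain ⟨hk, hkv, rfl⟩ := (hmem' k c).mp ((PySem.List.mem_sorted _ _ _ _).mp hy)
      have hle := hvmin k hk
      refine lt_of_le_of_ne hle ?_
      intro he
      have hpe := toLex.injective he
      simp only [Prod.mk.injEq] at hpe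
      exact hkv hpe.2.symm
    · have hnd : (PySem.List.sorted ((PySem.Set.ofList pool').map
          (fun k => (k, (List.count k pool' : Int)))) pvKey).Nodup :=
        hT.nodup_iff.mpr (pvItems_nodup pool')
      have hpw := PySem.List.sorted_pairwise ((PySem.Set.ofList pool').map
          (fun k => (k, (List.count k pool' : Int)))) pvKey
      exact (hpw.and hnd).imp (fun {a b} hab => lt_of_le_of_ne hab.1 (fun he => hab.2 (pvKeyInj he)))

-- the whole while loop: it emits the lex-sorted (value, count) pairs, flattened, capped at 100 cells
lemma pvSelLoop_eq : ∀ (n : Nat) (pool out : List Int), pool.length ≤ n → Even out.length →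
    pvSelLoop pool out = out ++
      ((PySem.List.sorted ((PySem.Set.ofList pool).map (fun k => (k, (List.count k pool : Int)))) pvKey).flatMap
        (fun q => [q.1, q.2])).take (100 - out.length) := by
  intro n
  induction n with
  | zero =>
    intro pool out hlen _
    have : pool = [] := List.eq_nil_of_length_eq_zero (Nat.le_zero.mp hlen)
    subst this
    simp [pvSelLoop, PySem.Set.ofList, PySem.List.sorted]
  | succ n ih =>
    intro pool out hlen heven
    match pool with
    | [] => simp [pvSelLoop, PySem.Set.ofList, PySem.List.sorted]
    | p :: ps =>
      rw [pvSelLoop]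
      by_cases hout : 100 ≤ out.length
      · rw [if_pos hout, Nat.sub_eq_zero_of_le hout]
        simp
      · rw [if_neg hout]
        obtain ⟨k2, hk2⟩ := heven
        have hle98 : out.length ≤ 98 := by omega
        rw [pvHead p ps _ rfl, List.flatMap_cons]
        have htake : 100 - out.length = (98 - out.length) + 1 + 1 := by omega
        rw [htake]
        simp only [List.cons_append, List.nil_append, List.take_succ_cons]
        rw [ih ((p :: ps).filter (fun x => x !=
              (PySem.List.min2? (p :: ps) (fun x => (List.count x (p :: ps) : Int)) (fun x => x)).getD 0))
            (out ++ [(PySem.List.min2? (p :: ps) (fun x => (List.count x (p :: ps) : Int)) (fun x => x)).getD 0,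
              (List.count ((PySem.List.min2? (p :: ps) (fun x => (List.count x (p :: ps) : Int)) (fun x => x)).getD 0) (p :: ps) : Int)])
            (by
              have := pvSel_dec p ps _ (pvMin2_getD_mem p ps (fun x => (List.count x (p :: ps) : Int)))
              omega)
            (by
              rw [List.length_append]
              exact ⟨k2 + 1, by simp only [List.length_cons, List.length_nil]; omega⟩)]
        have h2 : ∀ (u w : Int), 100 - (out ++ [u, w]).length = 98 - out.length := by
          intro u w
          simp only [List.length_append, List.length_cons, List.length_nil]
          omega
        rw [h2]
        simp

-- A's loop body / B's _row agree on every row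
lemma pvRow_eq (row : List Int) : pvRowA row = pvRowB row := by
  unfold pvRowA pvRowB
  dsimp only
  rw [PySem.Dict.items_counter, pvSorted2_eq_sorted_lex,
    PySem.List.foldl_append_eq_flatMap, List.nil_append]
  rw [pvSelLoop_eq (row.filter (fun x => x != 0)).length _ [] le_rfl (by simp), List.nil_append]
  simp only [List.length_nil, Nat.sub_zero]
  split_ifs with h
  · rw [PySem.List.slice_to _ (by norm_num)]
    simp
  · exact (List.take_of_length_le (by omega)).symm

-- A's accumulating loop, characterised
lemma pvLoopA (rows : List (List Int)) : ∀ (acc : List (List Int)) (m : Int),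
    rows.foldl (fun (st : List (List Int) × Int) row =>
      (st.1 ++ [pvRowA row],
       if st.2 < ((pvRowA row).length : Int) then ((pvRowA row).length : Int) else st.2)) (acc, m)
    = (acc ++ rows.map pvRowA, (rows.map (fun r => ((pvRowA r).length : Int))).foldl max m) := by
  induction rows with
  | nil => intro acc m; simp
  | cons r rs ih =>
    intro acc m
    simp only [List.foldl_cons, List.map_cons]
    rw [ih]
    congr 1
    · simp
    · congr 1
      omega

-- ===== VERDICT (by name: the statement is the Claim_ definition above) =====
theorem calculate_spec : Claim_equal_calculate := by
  intro a _
  show calculate a = calculate_alt a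
  have hrow : a.map pvRowB = a.map pvRowA :=
    List.map_congr_left (fun r _ => (pvRow_eq r).symm)
  have e1 : calculate a =
      (a.map pvRowA).map (fun row => row ++ PySem.List.pyRepeat [0]
        ((a.map (fun r => ((pvRowA r).length : Int))).foldl max 0 - (row.length : Int))) := by
    show ((a.foldl (fun (st : List (List Int) × Int) row =>
        (st.1 ++ [pvRowA row],
         if st.2 < ((pvRowA row).length : Int) then ((pvRowA row).length : Int) else st.2)) ([], 0)).1).map
        (fun row => row ++ PySem.List.pyRepeat [0]
          ((a.foldl (fun (st : List (List Int) × Int) row =>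
            (st.1 ++ [pvRowA row],
             if st.2 < ((pvRowA row).length : Int) then ((pvRowA row).length : Int) else st.2)) ([], 0)).2
            - (row.length : Int))) = _
    rw [pvLoopA a [] 0]
    simp
  have e2 : calculate_alt a =
      (a.map pvRowB).map (fun r => r ++ PySem.List.pyRepeat [0]
        (((PySem.List.max? ((0 : Int) :: (a.map pvRowB).map (fun r => (r.length : Int))) (fun x => x)).getD 0)
          - (r.length : Int))) := rfl
  have hl : (List.map pvRowA a).map (fun r => ((r.length : Int)))
      = a.map (fun r => ((pvRowA r).length : Int)) := by
    simp [List.map_map, Function.comp]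
  rw [e1, e2, hrow, hl, PySem.List.max?_id_cons, Option.getD_some]
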